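-- pv_equiv track=rewrite | github.com/FreesiaLikesPomelo/-offer | Q40_singleNumbers.py | find1stBit
-- ===== SOURCE A (Python) =====
-- def find1stBit(temp: int)-> int:
--     # temp != 0
--     idx = 0
--     if temp&1==1:
--         return idx
--     while temp&1==0:
--         temp = temp>>1
--         idx+=1
--     return idx
-- ===== SOURCE B (Python) =====
-- def find1stBit(temp: int) -> int:
--     # closed form: isolate lowest set bit, read off its position
--     return (temp & -temp).bit_length() - 1
-- ===== Notes on version B (the rewrite author's own statement) =====
-- stated objective: idiomatic
-- what changed: The shift-and-count loop is replaced by the closed form (temp & -temp).bit_length() - 1: isolate the lowest set bit and read its position directly, no loop or branch.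
import Mathlib
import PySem

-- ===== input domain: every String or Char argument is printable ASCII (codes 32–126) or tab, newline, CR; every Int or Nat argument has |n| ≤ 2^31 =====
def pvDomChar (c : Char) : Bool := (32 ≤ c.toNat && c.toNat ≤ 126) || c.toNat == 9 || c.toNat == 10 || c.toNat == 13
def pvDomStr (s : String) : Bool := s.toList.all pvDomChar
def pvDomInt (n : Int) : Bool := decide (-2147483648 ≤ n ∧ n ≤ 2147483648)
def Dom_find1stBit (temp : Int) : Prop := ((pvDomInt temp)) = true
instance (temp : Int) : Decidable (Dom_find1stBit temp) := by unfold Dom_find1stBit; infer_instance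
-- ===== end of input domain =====

-- B replaces A's shift-and-count loop by the closed form (temp & -temp).bit_length() - 1 (idiomatic, loop-free).


-- ===== PORT A =====
-- the while loop of A, as fuelled recursion; 64 fuel suffices for every |temp| ≤ 2^31
-- (on temp = 0 Python A loops forever; such inputs are excluded by Pre_find1stBit)
def findLoop : Nat → Int → Int → Int
  | 0, _, idx => idx
  | fuel + 1, temp, idx =>
    if PySem.Int.band temp 1 = 0 then findLoop fuel (temp >>> (1 : Nat)) (idx + 1) else idx

def find1stBit (temp : Int) : Int :=
  let idx : Int := 0
  if PySem.Int.band temp 1 = 1 then idx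
  else findLoop 64 temp idx

-- ===== PORT B =====
def find1stBit_alt (temp : Int) : Int :=
  (PySem.Int.bitLength (PySem.Int.band temp (-temp)) : Int) - 1

-- ===== PRECONDITION & SPEC =====
-- A's own comment says temp != 0; on temp = 0 the while loop never terminates, so it is excluded.
def Pre_find1stBit (temp : Int) : Prop := temp ≠ 0
instance (temp : Int) : Decidable (Pre_find1stBit temp) := by unfold Pre_find1stBit; infer_instance
def pvWitness_find1stBit : Int := (6)

def Spec_find1stBit (temp : Int) (out : Int) : Prop := out = find1stBit_alt temp
instance (temp : Int) (out : Int) : Decidable (Spec_find1stBit temp out) := by unfold Spec_find1stBit; infer_instance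

-- ===== CLAIM (what is proved, stated in full; the proofs are below) =====
def Claim_equal_find1stBit : Prop := ∀ (temp : Int), Dom_find1stBit temp → Pre_find1stBit temp → Spec_find1stBit temp (find1stBit temp)

-- ===== LEMMAS AND PROOFS =====

-- number of trailing zero bits of a positive Nat
def tz (m : Nat) : Nat :=
  if m % 2 = 1 ∨ m = 0 then 0 else tz (m / 2) + 1
decreasing_by omega

lemma tz_odd {m : Nat} (h : m % 2 = 1) : tz m = 0 := by
  rw [tz]; simp [h]

lemma tz_even {m : Nat} (h : m % 2 = 0) (h0 : m ≠ 0) : tz m = tz (m / 2) + 1 := by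
  rw [tz]; simp [h, h0]

-- (2j+1) &&& 2j = 2j  (Nat)
lemma land_odd_pred (j : Nat) : (2 * j + 1) &&& (2 * j) = 2 * j := by
  apply Nat.eq_of_testBit_eq
  intro i
  cases i with
  | zero => simp [Nat.testBit_land, Nat.testBit_zero, Nat.mul_comm, Nat.mul_add_mod]
  | succ i =>
      rw [Nat.testBit_land]
      have h1 : (2 * j + 1) / 2 = j := by omega
      have h2 : (2 * j) / 2 = j := by omega
      simp [Nat.testBit_succ, h1, h2]

-- 2j &&& (2j - 1) = 2 * (j &&& (j-1)) for j ≥ 1  (Nat)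
lemma land_even_pred {j : Nat} (hj : j ≠ 0) :
    (2 * j) &&& (2 * j - 1) = 2 * (j &&& (j - 1)) := by
  apply Nat.eq_of_testBit_eq
  intro i
  cases i with
  | zero => simp [Nat.testBit_land, Nat.testBit_zero, Nat.mul_add_mod, Nat.mul_mod_right]
  | succ i =>
      rw [Nat.testBit_land]
      have h1 : (2 * j) / 2 = j := by omega
      have h2 : (2 * j - 1) / 2 = j - 1 := by omega
      have h3 : (2 * (j &&& (j - 1))) / 2 = j &&& (j - 1) := by omega
      simp [Nat.testBit_succ, h1, h2, h3, Nat.testBit_land]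

-- m - (m &&& (m-1)) is the lowest set bit, = 2 ^ tz m  (m ≠ 0)
lemma low_eq_pow_tz : ∀ m : Nat, m ≠ 0 → m - (m &&& (m - 1)) = 2 ^ tz m := by
  intro m
  induction m using Nat.strong_induction_on with
  | _ m ih =>
    intro hm
    rcases Nat.even_or_odd m with he | ho
    · obtain ⟨j, hj⟩ := he
      have hj' : m = 2 * j := by omega
      subst hj'
      have hjne : j ≠ 0 := by omega
      have hland := land_even_pred hjne
      have hIH := ih j (by omega) hjne
      have hle : j &&& (j - 1) ≤ j := Nat.and_le_left
      have htz : tz (2 * j) = tz j + 1 := by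
        rw [tz_even (by omega) (by omega)]
        congr 1
        congr 1
        omega
      rw [hland, htz, pow_succ]
      omega
    · have hmod : m % 2 = 1 := Nat.odd_iff.mp ho
      obtain ⟨j, hj⟩ := ho
      have hj' : m = 2 * j + 1 := by omega
      subst hj'
      have : (2 * j + 1) - 1 = 2 * j := by omega
      rw [this, land_odd_pred, tz_odd hmod]
      omega

-- band temp (-temp) in terms of natAbs, uniformly in the sign
lemma band_neg_self (temp : Int) (h : temp ≠ 0) :
    PySem.Int.band temp (-temp) = ((temp.natAbs - (temp.natAbs &&& (temp.natAbs - 1)) : Nat) : Int) := by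
  unfold PySem.Int.band
  rcases lt_trichotomy temp 0 with hlt | heq | hgt
  · have h1 : ¬ (0 ≤ temp) := by omega
    have h2 : (0 : Int) ≤ -temp := by omega
    simp only [h1, h2, if_true, if_false]
    have e1 : (-temp).toNat = temp.natAbs := by omega
    have e2 : (-temp - 1).toNat = temp.natAbs - 1 := by omega
    rw [e1, e2]
  · omega
  · have h1 : (0 : Int) ≤ temp := by omega
    have h2 : ¬ ((0 : Int) ≤ -temp) := by omega
    simp only [h1, h2, if_true, if_false]
    have e1 : temp.toNat = temp.natAbs := by omega
    have e2 : (- -temp - 1).toNat = temp.natAbs - 1 := by omega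
    rw [e1, e2]

lemma bitLength_pow (k : Nat) : PySem.Int.bitLength ((2 ^ k : Nat) : Int) = k + 1 := by
  have h1 := PySem.Int.lt_two_pow_bitLength ((2 ^ k : Nat) : Int)
  have h2 := PySem.Int.two_pow_bitLength_le ((2 ^ k : Nat) : Int) (by positivity)
  rw [Int.natAbs_natCast] at h1 h2
  set b := PySem.Int.bitLength ((2 ^ k : Nat) : Int) with hb
  have hk : k < b := (Nat.pow_lt_pow_iff_right (by omega)).mp h1
  have hb1 : b - 1 ≤ k := (Nat.pow_le_pow_iff_right (by omega)).mp h2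
  omega

-- B computes tz of the absolute value
lemma alt_eq_tz (temp : Int) (h : temp ≠ 0) :
    find1stBit_alt temp = (tz temp.natAbs : Int) := by
  unfold find1stBit_alt
  rw [band_neg_self temp h, low_eq_pow_tz temp.natAbs (by omega), bitLength_pow]
  push_cast
  ring

-- parity of temp via band temp 1
lemma band_one_emod (temp : Int) : PySem.Int.band temp 1 = temp % 2 := by
  rw [PySem.Int.band_one, PySem.Int.mod_eq_emod_of_pos (by omega)]

-- the loop counts trailing zeros, given enough fuel
lemma findLoop_eq : ∀ (fuel : Nat) (temp idx : Int), temp ≠ 0 → temp.natAbs < 2 ^ fuel →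
    findLoop fuel temp idx = idx + (tz temp.natAbs : Int) := by
  intro fuel
  induction fuel with
  | zero => intro temp idx h hlt; simp at hlt; omega
  | succ f ih =>
      intro temp idx h hlt
      rw [findLoop, band_one_emod]
      by_cases hpar : temp % 2 = 0
      · simp only [hpar, if_true]
        have hdvd : (2 : Int) ∣ temp := Int.dvd_of_emod_eq_zero hpar
        obtain ⟨c, hc⟩ := hdvd
        have hsh : temp >>> (1 : Nat) = c := by
          rw [Int.shiftRight_eq_div_pow]
          omega
        have hcne : c ≠ 0 := by omega
        have habs : c.natAbs = temp.natAbs / 2 := by omega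
        have hlt' : c.natAbs < 2 ^ f := by
          have : 2 ^ (f + 1) = 2 * 2 ^ f := by ring
          omega
        rw [hsh, ih c (idx + 1) hcne hlt']
        have htz : tz temp.natAbs = tz (temp.natAbs / 2) + 1 :=
          tz_even (by omega) (by omega)
        rw [htz, habs]
        push_cast
        ring
      · have h1 : temp % 2 = 1 := by omega
        simp only [h1]
        have htz : tz temp.natAbs = 0 := tz_odd (by omega)
        rw [htz]
        norm_num

-- ===== VERDICT (by name: the statement is the Claim_ definition above) =====
theorem find1stBit_spec : Claim_equal_find1stBit := by
  intro temp hdom hpre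
  unfold Spec_find1stBit
  have hdom' : temp.natAbs ≤ 2147483648 := by
    unfold Dom_find1stBit pvDomInt at hdom
    simp at hdom
    omega
  rw [alt_eq_tz temp hpre]
  unfold find1stBit
  rw [band_one_emod]
  by_cases hpar : temp % 2 = 1
  · simp only [hpar, if_true]
    have : tz temp.natAbs = 0 := tz_odd (by omega)
    simp [this]
  · have h0 : temp % 2 = 0 := by omega
    simp only [hpar, if_false]
    rw [findLoop_eq 64 temp 0 hpre (by norm_num; omega)]
    ring
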